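-- pv_equiv track=rewrite | github.com/yasufumi-nakata/Pytra | src/toolchain2/emit/lua/emitter.py | _tid_const_name
-- ===== SOURCE A (Python) =====
-- def _tid_const_name(fqcn: str) -> str:
--     dotted = fqcn.replace(".", "_")
--     chars: list[str] = []
--     prev_is_lower = False
--     for ch in dotted:
--         is_upper = "A" <= ch and ch <= "Z"
--         is_lower = "a" <= ch and ch <= "z"
--         if is_upper and prev_is_lower:
--             chars.append("_")
--         chars.append(ch.upper())
--         prev_is_lower = is_lower
--     result = "".join(chars) + "_TID"
--     if result != "" and result[0].isdigit():
--         result = "_" + result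
--     return result
-- ===== SOURCE B (Python) =====
-- def _tid_const_name(fqcn: str) -> str:
--     dotted = fqcn.replace(".", "_")
--     # staged: (1) compute the camelCase boundary positions, (2) split into
--     # segments at those positions, (3) join with '_' and uppercase once
--     cuts = [0] + [i for i in range(1, len(dotted))
--                   if "a" <= dotted[i - 1] <= "z" and "A" <= dotted[i] <= "Z"] + [len(dotted)]
--     name = "_".join(dotted[a:b] for a, b in zip(cuts, cuts[1:])).upper() + "_TID"
--     return "_" + name if name[:1].isdigit() else name
-- ===== Notes on version B (the rewrite author's own statement) =====
-- stated objective: idiomatic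
-- what changed: Replaces A's per-character state machine (prev_is_lower flag emitting chars one by one) with a staged split-and-join algorithm: first compute the list of camelCase boundary indices, then slice the string into segments at those indices, join the segments with underscores and uppercase the whole string once.
import Mathlib
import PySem

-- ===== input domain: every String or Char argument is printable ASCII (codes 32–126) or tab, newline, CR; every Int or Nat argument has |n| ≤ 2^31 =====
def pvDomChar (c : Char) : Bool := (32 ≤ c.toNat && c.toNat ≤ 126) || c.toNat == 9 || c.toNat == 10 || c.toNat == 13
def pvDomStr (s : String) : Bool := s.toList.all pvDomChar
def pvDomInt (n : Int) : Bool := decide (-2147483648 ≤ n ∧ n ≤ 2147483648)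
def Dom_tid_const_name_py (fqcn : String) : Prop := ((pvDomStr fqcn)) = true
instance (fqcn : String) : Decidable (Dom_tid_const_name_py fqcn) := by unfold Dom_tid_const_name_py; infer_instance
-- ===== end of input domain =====

-- B replaces A's per-character prev_is_lower state machine by a staged algorithm:
-- compute the boundary index list, slice into segments, join with '_' and do one
-- whole-string .upper() (idiomatic; same cost).


-- ===== PORT A =====
def tid_const_name_py (fqcn : String) : String :=
  let dotted := (PySem.Str.replace fqcn "." "_").toList
  let st := dotted.foldl (fun (st : List Char × Bool) ch =>
      let isUpper := decide ('A' ≤ ch ∧ ch ≤ 'Z')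
      let isLower := decide ('a' ≤ ch ∧ ch ≤ 'z')
      let chars := if isUpper && st.2 then st.1 ++ ['_'] else st.1
      (chars ++ [PySem.Chars.upperChar ch], isLower)) ([], false)
  let result := st.1 ++ "_TID".toList
  let result :=
    if (!result.isEmpty) &&
       (match PySem.List.pyGet? result 0 with
        | some c => PySem.Chars.isdigit c
        | none => false) then '_' :: result else result
  String.ofList result

-- ===== PORT B =====
def tid_const_name_py_alt (fqcn : String) : String :=
  let dotted := (PySem.Str.replace fqcn "." "_").toList
  let n : Int := (dotted.length : Int)
  let cuts : List Int := [(0 : Int)] ++ ((PySem.List.pyRange 1 n 1).filter (fun i =>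
      match PySem.List.pyGet? dotted (i - 1), PySem.List.pyGet? dotted i with
      | some p, some c => decide ('a' ≤ p ∧ p ≤ 'z') && decide ('A' ≤ c ∧ c ≤ 'Z')
      | _, _ => false)) ++ [n]
  let segs := (cuts.zip cuts.tail).map (fun ab => PySem.List.slice dotted (some ab.1) (some ab.2))
  let name := PySem.Chars.upper (PySem.Chars.join ['_'] segs) ++ "_TID".toList
  if PySem.Chars.strIsdigit (name.take 1) then String.ofList ('_' :: name) else String.ofList name

-- ===== PRECONDITION & SPEC =====
def Spec_tid_const_name_py (fqcn : String) (out : String) : Prop := out = tid_const_name_py_alt fqcn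
instance (fqcn : String) (out : String) : Decidable (Spec_tid_const_name_py fqcn out) := by unfold Spec_tid_const_name_py; infer_instance

-- ===== CLAIM (what is proved, stated in full; the proofs are below) =====
def Claim_equal_tid_const_name_py : Prop := ∀ (fqcn : String), Dom_tid_const_name_py fqcn → Spec_tid_const_name_py fqcn (tid_const_name_py fqcn)

-- ===== LEMMAS AND PROOFS =====

-- the (ASCII) boundary test "dotted[a] is lower and dotted[a+1] is upper", Nat-indexed
def pvBnd (cs : List Char) (a : Nat) : Bool :=
  match cs[a]?, cs[a+1]? with
  | some p, some c => decide ('a' ≤ p ∧ p ≤ 'z') && decide ('A' ≤ c ∧ c ≤ 'Z')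
  | _, _ => false

-- common reference: the pre-uppercase output, one char at a time from position a
def pvE (cs : List Char) (a : Nat) : List Char :=
  if h : a < cs.length then
    cs[a] :: ((if pvBnd cs a then ['_'] else []) ++ pvE cs (a + 1))
  else []
termination_by cs.length - a

-- pure recursive description of A's loop output (before upper-casing)
def pvG (prev : Bool) : List Char → List Char
  | [] => []
  | c :: cs =>
      (if decide ('A' ≤ c ∧ c ≤ 'Z') && prev then ['_'] else []) ++ [c]
        ++ pvG (decide ('a' ≤ c ∧ c ≤ 'z')) cs

lemma pvA_loop (cs : List Char) : ∀ (prev : Bool) (acc : List Char),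
    (cs.foldl (fun (st : List Char × Bool) ch =>
      let isUpper := decide ('A' ≤ ch ∧ ch ≤ 'Z')
      let isLower := decide ('a' ≤ ch ∧ ch ≤ 'z')
      let chars := if isUpper && st.2 then st.1 ++ ['_'] else st.1
      (chars ++ [PySem.Chars.upperChar ch], isLower)) (acc, prev)).1
    = acc ++ (pvG prev cs).map PySem.Chars.upperChar := by
  induction cs with
  | nil => intro prev acc; simp [pvG]
  | cons c cs ih =>
      intro prev acc
      simp only [List.foldl_cons, pvG, List.map_append, ih]
      split_ifs <;> simp <;> decide

-- the leading underscore pvG may emit at position a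
def pvUb (cs : List Char) (a : Nat) (prev : Bool) : Bool :=
  match cs[a]? with
  | some c => decide ('A' ≤ c ∧ c ≤ 'Z') && prev
  | none => false

lemma pvG_eq_pvE (cs : List Char) : ∀ a prev,
    pvG prev (cs.drop a) = (if pvUb cs a prev then ['_'] else []) ++ pvE cs a := by
  intro a
  induction' hfuel : cs.length - a using Nat.strong_induction_on with fuel ih generalizing a
  intro prev
  by_cases h : a < cs.length
  · have hdrop : cs.drop a = cs[a] :: cs.drop (a + 1) := List.drop_eq_getElem_cons h
    rw [hdrop]
    simp only [pvG]
    have hrec := ih (cs.length - (a+1)) (by omega) (a+1) rfl (decide ('a' ≤ cs[a] ∧ cs[a] ≤ 'z'))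
    have hub : pvUb cs a prev = (decide ('A' ≤ cs[a] ∧ cs[a] ≤ 'Z') && prev) := by
      simp [pvUb, List.getElem?_eq_getElem h]
    have hub2 : pvUb cs (a+1) (decide ('a' ≤ cs[a] ∧ cs[a] ≤ 'z')) = pvBnd cs a := by
      simp only [pvUb, pvBnd, List.getElem?_eq_getElem h]
      cases hc : cs[a+1]? <;> simp [Bool.and_comm]
    rw [hrec, hub2, hub]
    conv_rhs => rw [pvE]
    simp [h]
  · have hd : cs.drop a = [] := List.drop_eq_nil_of_le (by omega)
    have hg : cs[a]? = none := List.getElem?_eq_none (by omega)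
    rw [hd, pvE]
    simp [pvG, pvUb, h]

-- B-side: the mid-cut list from k upward
def pvMids (cs : List Char) (k : Int) : List Int :=
  (PySem.List.pyRange k (cs.length : Int) 1).filter (fun i =>
      match PySem.List.pyGet? cs (i - 1), PySem.List.pyGet? cs i with
      | some p, some c => decide ('a' ≤ p ∧ p ≤ 'z') && decide ('A' ≤ c ∧ c ≤ 'Z')
      | _, _ => false)

lemma pv_join_cons_head (sep : List Char) (c : Char) (x : List Char) (xs : List (List Char)) :
    PySem.Chars.join sep ((c :: x) :: xs) = c :: PySem.Chars.join sep (x :: xs) := by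
  cases xs with
  | nil => rfl
  | cons y t => rw [PySem.Chars.join_cons_cons, PySem.Chars.join_cons_cons]; simp

lemma pv_slice_peel (cs : List Char) (a : Nat) (b : Int) (ha : a < cs.length) (hab : (a : Int) < b) :
    PySem.List.slice cs (some (a : Int)) (some b)
      = cs[a] :: PySem.List.slice cs (some ((a : Int) + 1)) (some b) := by
  have hb : 0 ≤ b := by omega
  have h1 : ((a : Int) + 1) = ((a + 1 : Nat) : Int) := by push_cast; ring
  rw [PySem.List.slice_toNat cs (by positivity) hb, h1,
      PySem.List.slice_toNat cs (by positivity) hb]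
  simp only [Int.toNat_natCast]
  have hdrop : cs.drop a = cs[a] :: cs.drop (a + 1) := List.drop_eq_getElem_cons ha
  rw [hdrop]
  have : b.toNat - a = (b.toNat - (a + 1)) + 1 := by omega
  rw [this, List.take_succ_cons]

lemma pv_bnd_filter (cs : List Char) (a : Nat) :
    (match PySem.List.pyGet? cs ((a : Int) + 1 - 1), PySem.List.pyGet? cs ((a : Int) + 1) with
      | some p, some c => decide ('a' ≤ p ∧ p ≤ 'z') && decide ('A' ≤ c ∧ c ≤ 'Z')
      | _, _ => false) = pvBnd cs a := by
  have e1 : ((a : Int) + 1 - 1) = ((a : Nat) : Int) := by ring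
  rw [e1]
  have e2 : ((a : Int) + 1) = (((a + 1 : Nat)) : Int) := by push_cast; ring
  rw [e2]
  simp only [PySem.List.pyGet?_natCast, pvBnd]

lemma pvB_join (cs : List Char) : ∀ (a : Nat), a ≤ cs.length →
    PySem.Chars.join ['_']
      ((((a : Int) :: (pvMids cs ((a : Int) + 1) ++ [(cs.length : Int)])).zip
          (pvMids cs ((a : Int) + 1) ++ [(cs.length : Int)])).map
        (fun ab => PySem.List.slice cs (some ab.1) (some ab.2)))
      = pvE cs a := by
  intro a
  induction' hfuel : cs.length - a using Nat.strong_induction_on with fuel ih generalizing a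
  intro ha
  by_cases h : a < cs.length
  · have hbnd : ¬ (a + 1 < cs.length) → pvBnd cs a = false := by
      intro h2
      have : cs[a+1]? = none := List.getElem?_eq_none (by omega)
      simp [pvBnd, this]
    by_cases h2 : a + 1 < cs.length
    · have hcons : PySem.List.pyRange ((a:Int)+1) (cs.length : Int) 1
          = ((a:Int)+1) :: PySem.List.pyRange ((a:Int)+1+1) (cs.length : Int) 1 :=
        PySem.List.pyRange_one_cons (by exact_mod_cast (by omega : (a:Int)+1 < (cs.length:Int)))
      have hmids : pvMids cs ((a:Int)+1)
          = (if pvBnd cs a then [((a:Int)+1)] else []) ++ pvMids cs ((a:Int)+1+1) := by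
        rw [pvMids, hcons, List.filter_cons, pv_bnd_filter cs a]
        cases hb : pvBnd cs a <;> simp [pvMids]
      have hrec := ih (cs.length - (a+1)) (by omega) (a+1) rfl (by omega)
      have hcast : ((a:Int)+1) = (((a+1 : Nat)) : Int) := by push_cast; ring
      cases hb : pvBnd cs a
      · -- no cut at a+1: peel one char off the first segment
        have hmids' : pvMids cs ((a:Int)+1) = pvMids cs ((((a+1:Nat)):Int)+1) := by
          rw [hmids, hb, ← hcast]; simp
        rw [hmids']
        cases hrest : pvMids cs ((((a+1:Nat)):Int) + 1) ++ [(cs.length : Int)] with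
        | nil => exact absurd hrest (by simp)
        | cons b t =>
            have hab : ((a : Int)) < b := by
              have hbmem : b ∈ pvMids cs ((((a+1:Nat)):Int) + 1) ++ [(cs.length : Int)] := by
                rw [hrest]; simp
              rcases List.mem_append.mp hbmem with hm | hm
              · have h3 := (PySem.List.mem_pyRange_one.mp (List.mem_of_mem_filter hm)).1
                push_cast at h3 ⊢; omega
              · have h3 : b = (cs.length : Int) := by simpa using hm
                omega
            rw [hrest] at hrec
            simp only [List.zip_cons_cons, List.map_cons] at hrec ⊢
            rw [pv_slice_peel cs a b h hab, hcast, pv_join_cons_head, hrec]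
            conv_rhs => rw [pvE]
            simp [h, hb]
      · -- cut at a+1: first segment is [cs[a]], then '_' and the rest
        have hmids' : pvMids cs ((a:Int)+1) = ((a:Int)+1) :: pvMids cs ((((a+1:Nat)):Int)+1) := by
          rw [hmids, hb, ← hcast]; simp
        rw [hmids']
        simp only [List.cons_append, List.zip_cons_cons, List.map_cons]
        have hseg : PySem.List.slice cs (some ((a:Int))) (some ((a:Int)+1)) = [cs[a]] := by
          rw [pv_slice_peel cs a ((a:Int)+1) h (by omega)]
          rw [PySem.List.slice_toNat cs (by positivity) (by positivity)]
          simp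
        rw [hseg]
        cases hrest : pvMids cs ((((a+1:Nat)):Int) + 1) ++ [(cs.length : Int)] with
        | nil => exact absurd hrest (by simp)
        | cons b t =>
            rw [hrest] at hrec
            simp only [List.zip_cons_cons, List.map_cons] at hrec ⊢
            rw [hcast, PySem.Chars.join_cons_cons, hrec]
            conv_rhs => rw [pvE]
            simp [h, hb]
    · -- a is the last index: no mids, one one-char segment
      have hae : a + 1 = cs.length := by omega
      have hnil : pvMids cs ((a:Int)+1) = [] := by
        rw [pvMids, PySem.List.pyRange_one_eq_nil (by exact_mod_cast (by omega : (cs.length:Int) ≤ (a:Int)+1))]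
        rfl
      rw [hnil]
      simp only [List.nil_append, List.zip_cons_cons, List.zip_nil_right, List.map_cons, List.map_nil]
      rw [PySem.List.slice_toNat cs (by positivity) (by positivity)]
      simp only [Int.toNat_natCast]
      have hdrop : cs.drop a = cs[a] :: cs.drop (a + 1) := List.drop_eq_getElem_cons h
      have hd2 : cs.drop (a+1) = [] := List.drop_eq_nil_of_le (by omega)
      rw [hdrop, hd2]
      conv_rhs => rw [pvE]
      rw [pvE]
      simp [h, hbnd h2, hae]
      omega
  · -- a = length: a single empty segment, join is empty
    have hae : a = cs.length := by omega
    have hnil : pvMids cs ((a:Int)+1) = [] := by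
      rw [pvMids, PySem.List.pyRange_one_eq_nil (by exact_mod_cast (by omega : (cs.length:Int) ≤ (a:Int)+1))]
      rfl
    rw [hnil, pvE]
    simp only [List.nil_append, List.zip_cons_cons, List.zip_nil_right, List.map_cons,
      List.map_nil, dif_neg h]
    rw [PySem.List.slice_toNat cs (by positivity) (by positivity)]
    simp [hae]

theorem pv_main (fqcn : String) : tid_const_name_py fqcn = tid_const_name_py_alt fqcn := by
  unfold tid_const_name_py tid_const_name_py_alt
  simp only [pvA_loop, List.nil_append, List.singleton_append]
  generalize (PySem.Str.replace fqcn "." "_").toList = cs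
  have hA := pvG_eq_pvE cs 0 false
  have hub0 : pvUb cs 0 false = false := by
    unfold pvUb; cases h : cs[0]? <;> simp
  rw [hub0] at hA
  simp only [List.drop_zero, if_neg (Bool.false_ne_true), List.nil_append] at hA
  have hB := pvB_join cs 0 (by omega)
  simp only [Nat.cast_zero, zero_add] at hB
  have hmid : (PySem.List.pyRange 1 (cs.length : Int) 1).filter (fun i =>
      match PySem.List.pyGet? cs (i - 1), PySem.List.pyGet? cs i with
      | some p, some c => decide ('a' ≤ p ∧ p ≤ 'z') && decide ('A' ≤ c ∧ c ≤ 'Z')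
      | _, _ => false) = pvMids cs 1 := rfl
  rw [hA, hmid]
  simp only [List.cons_append, List.tail_cons]
  rw [hB]
  have hupper : ∀ l : List Char, PySem.Chars.upper l = l.map PySem.Chars.upperChar := fun _ => rfl
  rw [hupper]
  cases hc : pvE cs 0 with
  | nil => rfl
  | cons c t =>
      simp only [List.map_cons, List.cons_append]
      rw [PySem.List.pyGet?_zero_cons]
      simp only [List.take_succ_cons, List.take_zero, List.isEmpty_cons, Bool.not_false,
        Bool.true_and]
      simp only [PySem.Chars.strIsdigit]
      by_cases hd : PySem.Chars.isdigit (PySem.Chars.upperChar c) = true <;> simp [hd]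

-- ===== VERDICT (by name: the statement is the Claim_ definition above) =====
theorem tid_const_name_py_spec : Claim_equal_tid_const_name_py := by
  intro fqcn _
  unfold Spec_tid_const_name_py
  exact pv_main fqcn
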